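-- pv_equiv track=rewrite | github.com/greerviau/openvoiceassistant-hub | core/utils/nlp/preprocessing.py | encode_command
-- ===== SOURCE A (Python) =====
-- import typing
--
-- def encode_command(command: str, vocab: typing.List[str]) -> str:
--     last_blank = False
--     words = []
--     for word in command.split():
--         if word not in vocab:
--             if not last_blank:
--                 last_blank = True
--                 words.append("BLANK")
--         else:
--             last_blank = False
--             words.append(word)
--     if len(words) > 2:
--         if words[0] == "BLANK":
--             words.pop(0)
--     return " ".join(words)
-- ===== SOURCE B (Python) =====
-- def encode_command(command, vocab):
--     words = command.split()
--     in_vocab = [w in vocab for w in words]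
--     tokens = [w if f else "BLANK" for w, f in zip(words, in_vocab)]
--     keep = [f or pf for f, pf in zip(in_vocab, [True] + in_vocab[:-1])]
--     result = [t for t, k in zip(tokens, keep) if k]
--     if len(result) > 2 and result[0] == "BLANK":
--         result = result[1:]
--     return " ".join(result)
-- ===== Notes on version B (the rewrite author's own statement) =====
-- stated objective: alternative
-- what changed: Replaces A's stateful loop (a last_blank flag threaded through every iteration, appending as it goes) by a stateless staged pipeline: compute an in-vocab flag list, a token list, and a keep-mask by zipping the flags with their one-shifted copy (an element is dropped exactly when it and its predecessor are both out-of-vocab), then filter by the mask; the same leading-BLANK trim and join follow.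
import Mathlib
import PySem

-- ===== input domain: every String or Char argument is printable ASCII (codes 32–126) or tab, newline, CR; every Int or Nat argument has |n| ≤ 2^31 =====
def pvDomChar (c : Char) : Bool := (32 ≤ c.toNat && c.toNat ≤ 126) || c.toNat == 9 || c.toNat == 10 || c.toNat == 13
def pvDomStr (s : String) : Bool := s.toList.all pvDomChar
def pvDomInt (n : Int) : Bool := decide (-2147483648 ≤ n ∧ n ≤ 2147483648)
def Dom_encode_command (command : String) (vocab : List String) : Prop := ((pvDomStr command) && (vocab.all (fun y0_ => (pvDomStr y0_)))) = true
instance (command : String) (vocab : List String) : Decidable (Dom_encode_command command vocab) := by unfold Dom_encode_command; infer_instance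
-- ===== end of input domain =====

-- B replaces A's stateful flag loop by a stateless staged pipeline: flag list, token list,
-- keep-mask from zipping the flags with their shifted copy, then a filter; same result, same cost.

-- ===== PORT A =====
def encode_command (command : String) (vocab : List String) : String :=
  -- the for-loop threads (last_blank, words) through the split words
  let st := (PySem.Str.split₀ command).foldl
    (fun (st : Bool × List String) word =>
      if !(vocab.contains word) then
        if !st.1 then (true, st.2 ++ ["BLANK"]) else st
      else (false, st.2 ++ [word]))
    (false, [])
  let words :=
    if st.2.length > 2 then
      if st.2.headD "" == "BLANK" then st.2.tail else st.2
    else st.2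
  PySem.Str.join " " words

-- ===== PORT B =====
def encode_command_alt (command : String) (vocab : List String) : String :=
  let words := PySem.Str.split₀ command
  let in_vocab := words.map (fun w => vocab.contains w)
  let tokens := (words.zip in_vocab).map (fun p => if p.2 then p.1 else "BLANK")
  -- keep[i] = in_vocab[i] or in_vocab[i-1] (predecessor of the first word counts as in-vocab)
  let keep := (in_vocab.zip (true :: in_vocab.dropLast)).map (fun p => p.1 || p.2)
  let result := ((tokens.zip keep).filter (fun p => p.2)).map (fun p => p.1)
  let result := if result.length > 2 && result.headD "" == "BLANK" then result.drop 1 else result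
  PySem.Str.join " " result

-- ===== PRECONDITION & SPEC =====
def Spec_encode_command (command : String) (vocab : List String) (out : String) : Prop := out = encode_command_alt command vocab
instance (command : String) (vocab : List String) (out : String) : Decidable (Spec_encode_command command vocab out) := by unfold Spec_encode_command; infer_instance

-- ===== CLAIM (what is proved, stated in full; the proofs are below) =====
def Claim_equal_encode_command : Prop := ∀ (command : String) (vocab : List String), Dom_encode_command command vocab → Spec_encode_command command vocab (encode_command command vocab)

-- ===== LEMMAS AND PROOFS =====

-- common characterisation: the encoded word list given the previous word's in-vocab flag pf
def enc (vocab : List String) (pf : Bool) : List String → List String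
  | [] => []
  | w :: ws =>
    if vocab.contains w then w :: enc vocab true ws
    else (if pf then ["BLANK"] else []) ++ enc vocab false ws

-- A's fold from state (lb, acc) yields acc ++ enc (!lb)
theorem foldA_eq_enc (vocab : List String) (ws : List String) :
    ∀ (lb : Bool) (acc : List String),
    (ws.foldl
      (fun (st : Bool × List String) word =>
        if !(vocab.contains word) then
          if !st.1 then (true, st.2 ++ ["BLANK"]) else st
        else (false, st.2 ++ [word]))
      (lb, acc)).2
    = acc ++ enc vocab (!lb) ws := by
  induction ws with
  | nil => intro lb acc; simp [enc]
  | cons w ws ih =>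
    intro lb acc
    rw [List.foldl_cons]
    by_cases h : w ∈ vocab
    · rw [show (if (!vocab.contains w) = true then
            if (!(lb, acc).1) = true then (true, (lb, acc).2 ++ ["BLANK"]) else (lb, acc)
          else (false, (lb, acc).2 ++ [w])) = ((false : Bool), acc ++ [w]) from by simp [h]]
      rw [ih]
      simp [enc, h]
    · cases lb
      · rw [show (if (!vocab.contains w) = true then
              if (!((false : Bool), acc).1) = true then (true, ((false : Bool), acc).2 ++ ["BLANK"])
              else ((false : Bool), acc)
            else (false, ((false : Bool), acc).2 ++ [w])) = ((true : Bool), acc ++ ["BLANK"]) from by simp [h]]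
        rw [ih]
        simp [enc, h]
      · rw [show (if (!vocab.contains w) = true then
              if (!((true : Bool), acc).1) = true then (true, ((true : Bool), acc).2 ++ ["BLANK"])
              else ((true : Bool), acc)
            else (false, ((true : Bool), acc).2 ++ [w])) = ((true : Bool), acc) from by simp [h]]
        rw [ih]
        simp [enc, h]

-- zipping a list with itself shifted by one sentinel: the dropLast is invisible (zip truncates)
theorem zip_cons_dropLast {α : Type} (l : List α) (a : α) :
    l.zip (a :: l.dropLast) = l.zip (a :: l) := by
  induction l generalizing a with
  | nil => rfl
  | cons x xs ih =>
    cases xs with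
    | nil => rfl
    | cons y ys =>
      simp only [List.zip_cons_cons]
      rw [show (x :: y :: ys).dropLast = x :: (y :: ys).dropLast from rfl, ih x]
      simp [List.zip_cons_cons]

-- B's staged pipeline with a general previous flag pf yields enc pf
theorem pipeB_eq_enc (vocab : List String) (ws : List String) :
    ∀ (pf : Bool),
    ((((ws.zip (ws.map (fun w => vocab.contains w))).map
        (fun p => if p.2 then p.1 else "BLANK")).zip
      (((ws.map (fun w => vocab.contains w)).zip
          (pf :: ws.map (fun w => vocab.contains w))).map
        (fun p => p.1 || p.2))).filter (fun p => p.2)).map (fun p => p.1)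
    = enc vocab pf ws := by
  induction ws with
  | nil => intro pf; simp [enc]
  | cons w ws ih =>
    intro pf
    simp only [List.contains_eq_mem] at ih
    by_cases h : w ∈ vocab <;> cases pf <;> simp [enc, h, ih]

-- ===== VERDICT (by name: the statement is the Claim_ definition above) =====
theorem encode_command_spec : Claim_equal_encode_command := by
  intro command vocab _
  unfold Spec_encode_command encode_command encode_command_alt
  simp only [foldA_eq_enc, Bool.not_false, List.nil_append, zip_cons_dropLast]
  rw [pipeB_eq_enc]
  split_ifs <;> first
  | (simp_all [List.drop_one]; omega)
  | (simp_all [List.drop_one])
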